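-- pv_equiv track=rewrite | github.com/kaku-highball-village-tree/tsucrea-excel-modify-project_9 | src/PL_CsvToTsv_Cmd.py | build_pj_name_vertical_rows
-- ===== SOURCE A (Python) =====
-- from typing import List, Tuple
--
-- def build_pj_name_vertical_rows(objRows: List[List[str]]) -> List[List[str]]:
--     if not objRows:
--         return []
--
--     objHeaderRow: List[str] = objRows[0]
--     objItemRows: List[List[str]] = objRows[1:]
--
--     objVerticalRows: List[List[str]] = []
--     objVerticalHeader: List[str] = ["PJ名称"]
--     for objItemRow in objItemRows:
--         pszItemName: str = objItemRow[0] if len(objItemRow) > 0 else ""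
--         objVerticalHeader.append(pszItemName)
--     objVerticalRows.append(objVerticalHeader)
--
--     for iColumnIndex in range(1, len(objHeaderRow)):
--         pszProjectName: str = objHeaderRow[iColumnIndex]
--         objVerticalRow: List[str] = [pszProjectName]
--         for objItemRow in objItemRows:
--             pszValue: str = objItemRow[iColumnIndex] if len(objItemRow) > iColumnIndex else ""
--             objVerticalRow.append(pszValue)
--         objVerticalRows.append(objVerticalRow)
--
--     return objVerticalRows
-- ===== SOURCE B (Python) =====
-- from typing import List
--
-- def build_pj_name_vertical_rows(objRows: List[List[str]]) -> List[List[str]]: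
--     if not objRows:
--         return []
--     objHeaderRow = objRows[0]
--     objItemRows = objRows[1:]
--     width = max(1, len(objHeaderRow))
--     grid = [["PJ名称"] + objHeaderRow[1:width]]
--     for objItemRow in objItemRows:
--         grid.append((objItemRow + [""] * width)[:width])
--     return [list(col) for col in zip(*grid)]
-- ===== Notes on version B (the rewrite author's own statement) =====
-- stated objective: simpler
-- what changed: Replaces the fused column-major nested loops (header pass plus an indexed inner scan per column) by a two-pass normalize-then-transpose: build a rectangular width-padded grid, then transpose it with zip(*grid).
import Mathlib
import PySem

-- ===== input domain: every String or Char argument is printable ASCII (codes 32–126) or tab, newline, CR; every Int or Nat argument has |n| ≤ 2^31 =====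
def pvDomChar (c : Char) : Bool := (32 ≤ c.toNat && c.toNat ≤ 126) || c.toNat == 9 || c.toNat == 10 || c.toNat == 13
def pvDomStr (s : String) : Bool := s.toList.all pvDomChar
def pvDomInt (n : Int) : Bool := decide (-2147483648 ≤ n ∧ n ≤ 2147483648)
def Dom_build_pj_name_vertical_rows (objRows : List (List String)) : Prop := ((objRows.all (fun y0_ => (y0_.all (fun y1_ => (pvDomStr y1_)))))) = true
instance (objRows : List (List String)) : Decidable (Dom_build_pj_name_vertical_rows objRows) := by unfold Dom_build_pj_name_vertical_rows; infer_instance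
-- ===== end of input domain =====

-- B replaces A's fused column-major nested loops by normalize-then-transpose (pad to a
-- rectangular grid, then zip-transpose); objective: simpler decomposition, same cost.

-- ===== PORT A =====
def build_pj_name_vertical_rows (objRows : List (List String)) : List (List String) :=
  match objRows with
  | [] => []
  | objHeaderRow :: objItemRows =>
    let objVerticalHeader : List String := objItemRows.foldl
      (fun acc objItemRow =>
        acc ++ [if objItemRow.length > 0 then PySem.List.pyGetD objItemRow 0 "" else ""])
      ["PJ名称"]
    let objVerticalRows : List (List String) := [objVerticalHeader]
    (PySem.List.pyRange 1 (objHeaderRow.length : Int) 1).foldl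
      (fun acc iColumnIndex =>
        let pszProjectName := PySem.List.pyGetD objHeaderRow iColumnIndex ""
        let objVerticalRow : List String := objItemRows.foldl
          (fun racc objItemRow =>
            racc ++ [if ((objItemRow.length : Int) > iColumnIndex)
                     then PySem.List.pyGetD objItemRow iColumnIndex "" else ""])
          [pszProjectName]
        acc ++ [objVerticalRow])
      objVerticalRows

-- ===== PORT B =====
-- zip(*rows) for lists of strings: min row length many columns, taken in row order
-- (exact model of Python zip: truncates to the shortest row; index always in range).
def pyZipStar (rows : List (List String)) : List (List String) :=
  let n := ((rows.map List.length).min?).getD 0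
  (List.range n).map (fun i => rows.map (fun r => r.getD i ""))

def build_pj_name_vertical_rows_alt (objRows : List (List String)) : List (List String) :=
  match objRows with
  | [] => []
  | objHeaderRow :: objItemRows =>
    let width := max 1 objHeaderRow.length
    -- objHeaderRow[1:width] with nonnegative bounds = (drop 1).take (width-1), exact here
    let grid : List (List String) :=
      ("PJ名称" :: (objHeaderRow.drop 1).take (width - 1)) ::
        objItemRows.map (fun r => (r ++ List.replicate width "").take width)
    pyZipStar grid

-- ===== PRECONDITION & SPEC =====
def Spec_build_pj_name_vertical_rows (objRows : List (List String)) (out : List (List String)) : Prop := out = build_pj_name_vertical_rows_alt objRows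
instance (objRows : List (List String)) (out : List (List String)) : Decidable (Spec_build_pj_name_vertical_rows objRows out) := by unfold Spec_build_pj_name_vertical_rows; infer_instance

-- ===== CLAIM (what is proved, stated in full; the proofs are below) =====
def Claim_equal_build_pj_name_vertical_rows : Prop := ∀ (objRows : List (List String)), Dom_build_pj_name_vertical_rows objRows → Spec_build_pj_name_vertical_rows objRows (build_pj_name_vertical_rows objRows)

-- ===== LEMMAS AND PROOFS =====

-- min? of a nonempty list whose elements are all w is w
theorem pv_min?_const (w : Nat) (l : List Nat) (h : ∀ x ∈ l, x = w) :
    (w :: l).min? = some w := by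
  rw [List.min?_cons']
  congr 1
  induction l generalizing w with
  | nil => rfl
  | cons a l ih =>
    have ha : a = w := h a (by simp)
    simp only [List.foldl_cons, ha, min_self]
    exact ih w (fun x hx => h x (by simp [hx]))

-- getD of a row padded to width w
theorem pv_pad_getD (r : List String) (w i : Nat) (hi : i < w) :
    ((r ++ List.replicate w "").take w).getD i "" =
      if i < r.length then r.getD i "" else "" := by
  have h1 : ((r ++ List.replicate w "").take w)[i]? = (r ++ List.replicate w "")[i]? := by
    rw [List.getElem?_take]
    simp [hi]
  rw [List.getD_eq_getElem?_getD, h1, List.getElem?_append]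
  split_ifs with h
  · rw [List.getD_eq_getElem?_getD]
  · have : i - r.length < w := by omega
    simp [this]

theorem pv_main (objRows : List (List String)) :
    build_pj_name_vertical_rows objRows = build_pj_name_vertical_rows_alt objRows := by
  match objRows with
  | [] => rfl
  | h :: ts =>
    simp only [build_pj_name_vertical_rows, build_pj_name_vertical_rows_alt, pyZipStar,
      PySem.List.foldl_append_singleton_eq_map]
    set w := max 1 h.length with hw
    clear_value w
    -- the grid is rectangular with all rows of length w
    have hlens : ∀ x ∈ ((ts.map (fun r => (r ++ List.replicate w "").take w)).map List.length),
        x = w := by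
      intro x hx
      simp only [List.map_map, List.mem_map, Function.comp] at hx
      obtain ⟨r, _, hr⟩ := hx
      simp only [List.length_take, List.length_append, List.length_replicate] at hr
      omega
    have hg0 : ("PJ名称" :: (h.drop 1).take (w - 1)).length = w := by
      simp only [List.length_cons, List.length_take, List.length_drop]
      omega
    have hmin : ((("PJ名称" :: (h.drop 1).take (w - 1)) ::
        ts.map (fun r => (r ++ List.replicate w "").take w)).map List.length).min? = some w := by
      simp only [List.map_cons, hg0]
      exact pv_min?_const w _ hlens
    rw [hmin]
    simp only [Option.getD_some]
    -- peel off column 0 on both sides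
    have hw1 : 1 ≤ w := by omega
    obtain ⟨w', rfl⟩ : ∃ w', w = w' + 1 := ⟨w - 1, by omega⟩
    rw [List.range_succ_eq_map]
    simp only [List.map_cons, List.singleton_append]
    refine List.cons_eq_cons.mpr ⟨?_, ?_⟩
    · -- column 0
      simp only [List.map_map]
      refine List.cons_eq_cons.mpr ⟨?_, ?_⟩
      · rfl
      · apply List.map_congr_left
        intro r _
        simp only [Function.comp_apply]
        rw [pv_pad_getD r (w' + 1) 0 (by omega)]
        split_ifs with h1
        · rw [PySem.List.pyGetD_zero]
        · rfl
    · -- columns 1..w'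
      rcases Nat.eq_zero_or_pos h.length with hz | hpos
      · -- empty header: both column lists are empty (w' = 0)
        have hz' : w' = 0 := by omega
        rw [hz, hz', PySem.List.pyRange_one_eq_nil (by simp)]
        simp
      have hlen : h.length = w' + 1 := by omega
      rw [hlen, show ((w' + 1 : Nat) : Int) = 1 + (w' : Int) by push_cast; ring,
        PySem.List.pyRange_one, List.map_map, List.map_map]
      simp only [add_sub_cancel_left, Int.toNat_natCast]
      apply List.map_congr_left
      intro k hk
      rw [List.mem_range] at hk
      simp only [Function.comp_apply, Nat.succ_eq_add_one, List.map_map]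
      refine List.cons_eq_cons.mpr ⟨?_, ?_⟩
      · -- head: header cell
        rw [show (1 : Int) + (k : Int) = ((k + 1 : Nat) : Int) by push_cast; ring,
          PySem.List.pyGetD_natCast]
        simp [hk, List.getD_eq_getElem?_getD]
      · -- tail: item cells
        apply List.map_congr_left
        intro r _
        simp only [Function.comp_apply]
        rw [pv_pad_getD r (w' + 1) (k + 1) (by omega),
          show (1 : Int) + (k : Int) = ((k + 1 : Nat) : Int) by push_cast; ring,
          PySem.List.pyGetD_natCast]
        split_ifs with h1 h2 h2
        · rfl
        · exfalso; omega
        · exfalso; exact h1 (by exact_mod_cast h2)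
        · rfl

-- ===== VERDICT (by name: the statement is the Claim_ definition above) =====
theorem build_pj_name_vertical_rows_spec : Claim_equal_build_pj_name_vertical_rows := by
  intro objRows _
  exact pv_main objRows
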